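-- pv_equiv track=rewrite | github.com/sulemansm/rcba-console | report_handler_backup.py | filter_reports
-- ===== SOURCE A (Python) =====
-- from typing import List, Optional, Dict
--
-- def _normalise_status(raw: str) -> str:
--     mapping = {
--         "approved":  "Approved",
--         "approve":   "Approved",
--         "rejected":  "Rejected",
--         "reject":    "Rejected",
--         "changes":   "Rejected",
--         "pending":   "Pending",
--     }
--     return mapping.get(raw.lower().strip(), raw)
--
-- def get_status(report: dict) -> str:
--     """Unified status getter (handles both old and new field names)."""
--     raw = report.get("status") or report.get("approval_status", "Pending")
--     return _normalise_status(raw)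
--
-- def filter_reports(
--     reports: List[dict],
--     status: Optional[str] = None,
--     submitted_by: Optional[str] = None,
--     date_from: Optional[str] = None,
--     date_to: Optional[str] = None,
--     search: Optional[str] = None,
-- ) -> List[dict]:
--     out = reports
--
--     if status and status != "All":
--         out = [r for r in out if get_status(r) == status]
--
--     if submitted_by and submitted_by != "All":
--         out = [r for r in out if
--                r.get("submitted_by_email", "").lower() == submitted_by.lower() or
--                r.get("submitted_by_name", "").lower() == submitted_by.lower()]
--
--     if date_from:
--         out = [r for r in out if
--                (r.get("event_start_date") or r.get("submitted_at", ""))[:10] >= date_from]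
--
--     if date_to:
--         out = [r for r in out if
--                (r.get("event_start_date") or r.get("submitted_at", ""))[:10] <= date_to]
--
--     if search:
--         q = search.lower()
--         out = [r for r in out if
--                q in r.get("event_title", "").lower() or
--                q in r.get("submitted_by_name", "").lower() or
--                q in r.get("avenue", "").lower()]
--
--     return out
-- ===== SOURCE B (Python) =====
-- from typing import List, Optional
--
-- def _normalise_status(raw: str) -> str:
--     mapping = {
--         "approved":  "Approved",
--         "approve":   "Approved",
--         "rejected":  "Rejected",
--         "reject":    "Rejected",
--         "changes":   "Rejected",
--         "pending":   "Pending",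
--     }
--     return mapping.get(raw.lower().strip(), raw)
--
-- def get_status(report: dict) -> str:
--     raw = report.get("status") or report.get("approval_status", "Pending")
--     return _normalise_status(raw)
--
-- def filter_reports(
--     reports: List[dict],
--     status: Optional[str] = None,
--     submitted_by: Optional[str] = None,
--     date_from: Optional[str] = None,
--     date_to: Optional[str] = None,
--     search: Optional[str] = None,
-- ) -> List[dict]:
--     # Single pass: one predicate combining all active filters.
--     def status_ok(r):
--         return not status or status == "All" or get_status(r) == status
--
--     def submitter_ok(r):
--         if not submitted_by or submitted_by == "All":
--             return True
--         q = submitted_by.lower()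
--         return (r.get("submitted_by_email", "").lower() == q or
--                 r.get("submitted_by_name", "").lower() == q)
--
--     def date_ok(r):
--         if not date_from and not date_to:
--             return True
--         d = (r.get("event_start_date") or r.get("submitted_at", ""))[:10]
--         return ((not date_from or d >= date_from) and
--                 (not date_to or d <= date_to))
--
--     def search_ok(r):
--         if not search:
--             return True
--         q = search.lower()
--         return (q in r.get("event_title", "").lower() or
--                 q in r.get("submitted_by_name", "").lower() or
--                 q in r.get("avenue", "").lower())
--
--     return [r for r in reports
--             if status_ok(r) and submitter_ok(r) and date_ok(r) and search_ok(r)]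
-- ===== Notes on version B (the rewrite author's own statement) =====
-- stated objective: alternative
-- what changed: The five sequential filtering comprehensions (each building an intermediate list) are replaced by one traversal of the input with a single combined predicate whose clauses short-circuit to True when their filter is inactive.
import Mathlib
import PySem

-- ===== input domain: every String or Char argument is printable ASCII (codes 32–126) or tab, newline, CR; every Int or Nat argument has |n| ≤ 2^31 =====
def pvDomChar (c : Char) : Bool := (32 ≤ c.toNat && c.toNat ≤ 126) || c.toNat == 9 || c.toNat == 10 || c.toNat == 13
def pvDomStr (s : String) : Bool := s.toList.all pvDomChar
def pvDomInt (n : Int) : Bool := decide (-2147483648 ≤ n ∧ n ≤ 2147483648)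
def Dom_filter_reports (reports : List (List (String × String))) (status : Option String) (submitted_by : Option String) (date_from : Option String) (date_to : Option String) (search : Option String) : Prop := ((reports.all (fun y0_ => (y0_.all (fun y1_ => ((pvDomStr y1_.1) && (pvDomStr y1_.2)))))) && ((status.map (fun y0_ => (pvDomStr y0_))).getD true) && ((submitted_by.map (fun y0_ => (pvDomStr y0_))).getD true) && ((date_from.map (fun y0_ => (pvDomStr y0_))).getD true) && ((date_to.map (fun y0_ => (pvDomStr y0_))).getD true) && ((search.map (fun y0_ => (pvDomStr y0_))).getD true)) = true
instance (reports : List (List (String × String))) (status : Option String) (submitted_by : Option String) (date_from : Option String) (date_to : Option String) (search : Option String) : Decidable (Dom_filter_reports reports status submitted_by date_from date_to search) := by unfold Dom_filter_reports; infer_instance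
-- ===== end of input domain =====

-- B replaces A's five sequential filter passes by one traversal with a single combined predicate (same cost; a different decomposition).


-- ===== PORT A =====
-- shared module helpers (same-module context of both Source A and Source B): dict get / get_status

-- r.get(k)  (first match in the association list)
def pyDictGet? (r : List (String × String)) (k : String) : Option String :=
  (r.find? (fun p => p.1 == k)).map (·.2)

-- r.get(k, dflt)
def pyDictGetD (r : List (String × String)) (k : String) (dflt : String) : String :=
  (pyDictGet? r k).getD dflt

def statusMapping : PySem.Dict String String :=
  PySem.Dict.ofList [("approved", "Approved"), ("approve", "Approved"),
    ("rejected", "Rejected"), ("reject", "Rejected"),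
    ("changes", "Rejected"), ("pending", "Pending")]

def normaliseStatus (raw : String) : String :=
  statusMapping.getD (PySem.Str.strip (PySem.Str.lower raw)) raw

-- raw = r.get("status") or r.get("approval_status", "Pending")
def getStatus (r : List (String × String)) : String :=
  let raw :=
    match pyDictGet? r "status" with
    | some s => if s = "" then pyDictGetD r "approval_status" "Pending" else s
    | none => pyDictGetD r "approval_status" "Pending"
  normaliseStatus raw

-- (r.get("event_start_date") or r.get("submitted_at", ""))[:10]
def dateKey (r : List (String × String)) : String :=
  let d :=
    match pyDictGet? r "event_start_date" with
    | some s => if s = "" then pyDictGetD r "submitted_at" "" else s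
    | none => pyDictGetD r "submitted_at" ""
  PySem.Str.slice d none (some 10)

-- A-side stage helpers: each 'if <filter active>: out = [r for r in out if …]' block
def stepStatus (status : Option String) (l : List (List (String × String))) : List (List (String × String)) :=
  match status with
  | none => l
  | some s => if s ≠ "" ∧ s ≠ "All" then l.filter (fun r => getStatus r == s) else l

def stepSubmitter (submitted_by : Option String) (l : List (List (String × String))) : List (List (String × String)) :=
  match submitted_by with
  | none => l
  | some sb =>
      if sb ≠ "" ∧ sb ≠ "All" then
        l.filter (fun r =>
          PySem.Str.lower (pyDictGetD r "submitted_by_email" "") == PySem.Str.lower sb ||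
          PySem.Str.lower (pyDictGetD r "submitted_by_name" "") == PySem.Str.lower sb)
      else l

def stepDateFrom (date_from : Option String) (l : List (List (String × String))) : List (List (String × String)) :=
  match date_from with
  | none => l
  | some df => if df ≠ "" then l.filter (fun r => decide (df ≤ dateKey r)) else l

def stepDateTo (date_to : Option String) (l : List (List (String × String))) : List (List (String × String)) :=
  match date_to with
  | none => l
  | some dt => if dt ≠ "" then l.filter (fun r => decide (dateKey r ≤ dt)) else l

def stepSearch (search : Option String) (l : List (List (String × String))) : List (List (String × String)) :=
  match search with
  | none => l
  | some sq =>
      if sq ≠ "" then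
        let q := PySem.Str.lower sq
        l.filter (fun r =>
          PySem.Str.isIn q (PySem.Str.lower (pyDictGetD r "event_title" "")) ||
          PySem.Str.isIn q (PySem.Str.lower (pyDictGetD r "submitted_by_name" "")) ||
          PySem.Str.isIn q (PySem.Str.lower (pyDictGetD r "avenue" "")))
      else l

-- A: five sequential filter passes
def filter_reports (reports : List (List (String × String))) (status : Option String) (submitted_by : Option String) (date_from : Option String) (date_to : Option String) (search : Option String) : List (List (String × String)) :=
  stepSearch search (stepDateTo date_to (stepDateFrom date_from (stepSubmitter submitted_by (stepStatus status reports))))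

-- ===== PORT B =====
-- B: one traversal with a combined predicate; each clause short-circuits to true when its filter is inactive.

def statusOk (status : Option String) (r : List (String × String)) : Bool :=
  match status with
  | none => true
  | some s => s == "" || s == "All" || getStatus r == s

def submitterOk (submitted_by : Option String) (r : List (String × String)) : Bool :=
  match submitted_by with
  | none => true
  | some sb =>
      if sb == "" || sb == "All" then true
      else
        let q := PySem.Str.lower sb
        PySem.Str.lower (pyDictGetD r "submitted_by_email" "") == q ||
        PySem.Str.lower (pyDictGetD r "submitted_by_name" "") == q

-- not x  (truthiness of the optional string)
def optFalsy (o : Option String) : Bool :=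
  match o with
  | none => true
  | some s => s == ""

def dateOk (date_from : Option String) (date_to : Option String) (r : List (String × String)) : Bool :=
  if optFalsy date_from && optFalsy date_to then true
  else
    let d := dateKey r
    (optFalsy date_from || decide (date_from.getD "" ≤ d)) &&
    (optFalsy date_to || decide (d ≤ date_to.getD ""))

def searchOk (search : Option String) (r : List (String × String)) : Bool :=
  match search with
  | none => true
  | some sq =>
      if sq == "" then true
      else
        let q := PySem.Str.lower sq
        PySem.Str.isIn q (PySem.Str.lower (pyDictGetD r "event_title" "")) ||
        PySem.Str.isIn q (PySem.Str.lower (pyDictGetD r "submitted_by_name" "")) ||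
        PySem.Str.isIn q (PySem.Str.lower (pyDictGetD r "avenue" ""))

def filter_reports_alt (reports : List (List (String × String))) (status : Option String) (submitted_by : Option String) (date_from : Option String) (date_to : Option String) (search : Option String) : List (List (String × String)) :=
  reports.filter (fun r =>
    statusOk status r && submitterOk submitted_by r && dateOk date_from date_to r && searchOk search r)

-- ===== PRECONDITION & SPEC =====
def Spec_filter_reports (reports : List (List (String × String))) (status : Option String) (submitted_by : Option String) (date_from : Option String) (date_to : Option String) (search : Option String) (out : List (List (String × String))) : Prop := out = filter_reports_alt reports status submitted_by date_from date_to search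
instance (reports : List (List (String × String))) (status : Option String) (submitted_by : Option String) (date_from : Option String) (date_to : Option String) (search : Option String) (out : List (List (String × String))) : Decidable (Spec_filter_reports reports status submitted_by date_from date_to search out) := by unfold Spec_filter_reports; infer_instance

-- ===== CLAIM (what is proved, stated in full; the proofs are below) =====
def Claim_equal_filter_reports : Prop := ∀ (reports : List (List (String × String))) (status : Option String) (submitted_by : Option String) (date_from : Option String) (date_to : Option String) (search : Option String), Dom_filter_reports reports status submitted_by date_from date_to search → Spec_filter_reports reports status submitted_by date_from date_to search (filter_reports reports status submitted_by date_from date_to search)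

-- ===== LEMMAS AND PROOFS =====

theorem stepStatus_eq (status : Option String) (l : List (List (String × String))) :
    stepStatus status l = l.filter (statusOk status) := by
  cases status with
  | none => exact (List.filter_eq_self.mpr (fun a _ => rfl)).symm
  | some s =>
      by_cases h : s ≠ "" ∧ s ≠ "All"
      · simp only [stepStatus, if_pos h]
        exact List.filter_congr (fun r _ => by simp [statusOk, h.1, h.2])
      · simp only [stepStatus, if_neg h]
        rw [not_and_or, not_not, not_not] at h
        refine (List.filter_eq_self.mpr (fun r _ => ?_)).symm
        rcases h with h | h <;> simp [statusOk, h]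

theorem stepSubmitter_eq (sb? : Option String) (l : List (List (String × String))) :
    stepSubmitter sb? l = l.filter (submitterOk sb?) := by
  cases sb? with
  | none => exact (List.filter_eq_self.mpr (fun a _ => rfl)).symm
  | some sb =>
      by_cases h : sb ≠ "" ∧ sb ≠ "All"
      · simp only [stepSubmitter, if_pos h]
        exact List.filter_congr (fun r _ => by simp [submitterOk, h.1, h.2])
      · simp only [stepSubmitter, if_neg h]
        rw [not_and_or, not_not, not_not] at h
        refine (List.filter_eq_self.mpr (fun r _ => ?_)).symm
        rcases h with h | h <;> simp [submitterOk, h]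

theorem stepDates_eq (df? dt? : Option String) (l : List (List (String × String))) :
    stepDateTo dt? (stepDateFrom df? l) = l.filter (dateOk df? dt?) := by
  have hfrom : stepDateFrom df? l =
      l.filter (fun r => optFalsy df? || decide (df?.getD "" ≤ dateKey r)) := by
    cases df? with
    | none => exact (List.filter_eq_self.mpr (fun a _ => rfl)).symm
    | some df =>
        by_cases h : df = ""
        · simp only [stepDateFrom, if_neg (not_not_intro h)]
          refine (List.filter_eq_self.mpr (fun r _ => ?_)).symm
          simp [optFalsy, h]
        · simp only [stepDateFrom, if_pos h]
          exact List.filter_congr (fun r _ => by simp [optFalsy, h])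
  have hto : ∀ l' : List (List (String × String)), stepDateTo dt? l' =
      l'.filter (fun r => optFalsy dt? || decide (dateKey r ≤ dt?.getD "")) := by
    intro l'
    cases dt? with
    | none => exact (List.filter_eq_self.mpr (fun a _ => rfl)).symm
    | some dt =>
        by_cases h : dt = ""
        · simp only [stepDateTo, if_neg (not_not_intro h)]
          refine (List.filter_eq_self.mpr (fun r _ => ?_)).symm
          simp [optFalsy, h]
        · simp only [stepDateTo, if_pos h]
          exact List.filter_congr (fun r _ => by simp [optFalsy, h])
  rw [hfrom, hto, List.filter_filter]
  refine List.filter_congr (fun r _ => ?_)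
  simp only [dateOk]
  cases hf : optFalsy df? <;> cases ht : optFalsy dt? <;> simp [Bool.and_comm]

theorem stepSearch_eq (sq? : Option String) (l : List (List (String × String))) :
    stepSearch sq? l = l.filter (searchOk sq?) := by
  cases sq? with
  | none => exact (List.filter_eq_self.mpr (fun a _ => rfl)).symm
  | some sq =>
      by_cases h : sq = ""
      · simp only [stepSearch, if_neg (not_not_intro h)]
        refine (List.filter_eq_self.mpr (fun r _ => ?_)).symm
        simp [searchOk, h]
      · simp only [stepSearch, if_pos h]
        exact List.filter_congr (fun r _ => by simp [searchOk, h])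

-- ===== VERDICT (by name: the statement is the Claim_ definition above) =====
theorem filter_reports_spec : Claim_equal_filter_reports := by
  intro reports status submitted_by date_from date_to search _
  unfold Spec_filter_reports filter_reports filter_reports_alt
  rw [stepStatus_eq, stepSubmitter_eq, List.filter_filter, stepDates_eq, stepSearch_eq,
    List.filter_filter, List.filter_filter]
  refine List.filter_congr (fun r _ => ?_)
  cases statusOk status r <;> cases submitterOk submitted_by r <;>
    cases dateOk date_from date_to r <;> cases searchOk search r <;> rfl
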